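-- pv_equiv track=rewrite | github.com/alexandraback/datacollection | solutions_2749486_0/Python/vivanov/b.py | do_one
-- ===== SOURCE A (Python) =====
-- def do_one(start, target, step, is_x):
--     d = target - start
--     if abs(d) == step:
--         if is_x :
--             if d > 0 :
--                 return ['E']
--             else :
--                 return ['W']
--         else  :
--             if d < 0 :
--                 return ['N']
--             else :
--                 return ['S']
--     else:
--         if is_x:
--             if d > 0:
--                 l = [ 'E' if i % 2 == 1 else 'W' for i in range(abs(d) * 2) ]
--             else :
--                 l = [ 'W' if i % 2 == 1 else 'E' for i in range(abs(d) * 2) ]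
--         else :
--             if d > 0:
--                 l = [ 'N' if i % 2 == 1 else 'S' for i in range(abs(d) * 2) ]
--             else :
--                 l = [ 'S' if i % 2 == 1 else 'N' for i in range(abs(d) * 2) ]
--         return  l
-- ===== SOURCE B (Python) =====
-- def _rep(pair, k):
--     # repeat the 2-letter block k times by binary doubling (O(log k) concatenations)
--     if k == 0:
--         return []
--     half = _rep(pair, k // 2)
--     block = half + half
--     if k % 2:
--         block = block + pair
--     return block
--
--
-- def do_one(start, target, step, is_x):
--     d = target - start
--     if abs(d) == step:
--         if is_x:
--             return ['E'] if d > 0 else ['W']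
--         return ['N'] if d < 0 else ['S']
--     if is_x:
--         pair = ['W', 'E'] if d > 0 else ['E', 'W']
--     else:
--         pair = ['S', 'N'] if d > 0 else ['N', 'S']
--     return _rep(pair, abs(d))
-- ===== Notes on version B (the rewrite author's own statement) =====
-- stated objective: alternative
-- what changed: B drops the index comprehension with the i%2 parity test entirely: it picks the (even,odd) letter pair once per branch and materialises the repeated block by recursive binary doubling on the count, O(log |d|) list concatenations instead of 2|d| per-index tests.
import Mathlib
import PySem

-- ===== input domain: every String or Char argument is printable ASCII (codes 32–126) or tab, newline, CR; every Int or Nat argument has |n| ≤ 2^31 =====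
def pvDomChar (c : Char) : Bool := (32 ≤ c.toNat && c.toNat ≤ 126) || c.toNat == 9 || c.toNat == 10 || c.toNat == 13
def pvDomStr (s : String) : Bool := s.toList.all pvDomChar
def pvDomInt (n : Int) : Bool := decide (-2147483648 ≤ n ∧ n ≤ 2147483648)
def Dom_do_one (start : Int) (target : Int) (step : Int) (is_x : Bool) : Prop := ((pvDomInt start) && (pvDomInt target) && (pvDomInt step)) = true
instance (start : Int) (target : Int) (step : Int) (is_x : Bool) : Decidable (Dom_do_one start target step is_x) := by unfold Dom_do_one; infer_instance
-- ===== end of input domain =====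

-- B replaces A's index comprehension with the i%2 parity test by choosing the letter pair once
-- and repeating it via recursive binary doubling; objective: alternative (same output cost).

-- ===== PORT A =====
def do_one (start : Int) (target : Int) (step : Int) (is_x : Bool) : List String :=
  let d := target - start
  if |d| = step then
    if is_x then
      if d > 0 then ["E"] else ["W"]
    else
      if d < 0 then ["N"] else ["S"]
  else
    let l :=
      if is_x then
        if d > 0 then (PySem.List.pyRange 0 (|d| * 2) 1).map (fun i => if PySem.Int.mod i 2 = 1 then "E" else "W")
        else (PySem.List.pyRange 0 (|d| * 2) 1).map (fun i => if PySem.Int.mod i 2 = 1 then "W" else "E")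
      else
        if d > 0 then (PySem.List.pyRange 0 (|d| * 2) 1).map (fun i => if PySem.Int.mod i 2 = 1 then "N" else "S")
        else (PySem.List.pyRange 0 (|d| * 2) 1).map (fun i => if PySem.Int.mod i 2 = 1 then "S" else "N")
    l

-- ===== PORT B =====
-- repeat the 2-letter block k times by binary doubling, as in Source B's _rep
def pvRep (pair : List String) (k : Nat) : List String :=
  if h : k = 0 then []
  else
    let half := pvRep pair (k / 2)
    let block := half ++ half
    if k % 2 = 1 then block ++ pair else block
decreasing_by exact Nat.div_lt_self (Nat.pos_of_ne_zero h) (by omega)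

def do_one_alt (start : Int) (target : Int) (step : Int) (is_x : Bool) : List String :=
  let d := target - start
  if |d| = step then
    if is_x then (if d > 0 then ["E"] else ["W"])
    else (if d < 0 then ["N"] else ["S"])
  else
    let pair :=
      if is_x then (if d > 0 then ["W", "E"] else ["E", "W"])
      else (if d > 0 then ["S", "N"] else ["N", "S"])
    pvRep pair (|d|).toNat

-- ===== PRECONDITION & SPEC =====
def Spec_do_one (start : Int) (target : Int) (step : Int) (is_x : Bool) (out : List String) : Prop := out = do_one_alt start target step is_x
instance (start : Int) (target : Int) (step : Int) (is_x : Bool) (out : List String) : Decidable (Spec_do_one start target step is_x out) := by unfold Spec_do_one; infer_instance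

-- ===== CLAIM (what is proved, stated in full; the proofs are below) =====
def Claim_equal_do_one : Prop := ∀ (start : Int) (target : Int) (step : Int) (is_x : Bool), Dom_do_one start target step is_x → Spec_do_one start target step is_x (do_one start target step is_x)

-- ===== LEMMAS AND PROOFS =====

-- the doubling recursion produces the block repeated k times
theorem pvRep_eq_replicate (pair : List String) (k : Nat) :
    pvRep pair k = (List.replicate k pair).flatten := by
  induction k using Nat.strong_induction_on with
  | _ k ih =>
    rw [pvRep]
    by_cases h : k = 0
    · simp [h]
    · rw [dif_neg h]
      have hrec := ih (k / 2) (Nat.div_lt_self (Nat.pos_of_ne_zero h) (by omega))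
      have hsum : k / 2 + k / 2 + k % 2 = k := by omega
      by_cases hp : k % 2 = 1
      · rw [if_pos hp, hrec]
        conv_rhs => rw [show k = k / 2 + k / 2 + 1 from by omega]
        simp only [List.replicate_add, List.flatten_append, List.replicate_one,
          List.flatten_cons, List.flatten_nil, List.append_nil]
      · rw [if_neg hp, hrec]
        conv_rhs => rw [show k = k / 2 + k / 2 from by omega]
        simp only [List.replicate_add, List.flatten_append]

-- the alternating comprehension over [0, 2n) is the pair [a, b] repeated n times
theorem alt_map_eq_replicate (a b : String) (n : Nat) :
    (PySem.List.pyRange 0 (2 * (n : Int)) 1).map (fun i => if PySem.Int.mod i 2 = 1 then b else a)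
      = (List.replicate n [a, b]).flatten := by
  induction n with
  | zero => simp [PySem.List.pyRange_one_eq_nil]
  | succ k ih =>
    have h1 : (2 : Int) * ((k : Int) + 1) = (2 * (k : Int) + 1) + 1 := by ring
    push_cast
    rw [h1, PySem.List.pyRange_one_succ_right (by omega),
        PySem.List.pyRange_one_succ_right (by omega)]
    have hm0 : PySem.Int.mod (2 * (k : Int)) 2 = 0 := by
      rw [PySem.Int.mod_eq_emod_of_pos (by omega)]; omega
    have hm1 : PySem.Int.mod (2 * (k : Int) + 1) 2 = 1 := by
      rw [PySem.Int.mod_eq_emod_of_pos (by omega)]; omega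
    simp only [List.map_append, List.map_cons, List.map_nil, ih, hm0, hm1,
      List.replicate_succ']
    simp

-- ===== VERDICT (by name: the statement is the Claim_ definition above) =====
theorem do_one_spec : Claim_equal_do_one := by
  unfold Claim_equal_do_one
  intro start target step is_x _
  unfold Spec_do_one do_one do_one_alt
  dsimp only
  set d := target - start with hd
  by_cases hstep : |d| = step
  · rw [if_pos hstep, if_pos hstep]
  · have h2 : |d| * 2 = 2 * (((|d|).toNat : Nat) : Int) := by
      have := abs_nonneg d; omega
    rw [if_neg hstep, if_neg hstep]
    cases is_x
    · rw [if_neg Bool.false_ne_true, if_neg Bool.false_ne_true]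
      by_cases hdpos : d > 0
      · rw [if_pos hdpos, if_pos hdpos, h2, alt_map_eq_replicate, pvRep_eq_replicate]
      · rw [if_neg hdpos, if_neg hdpos, h2, alt_map_eq_replicate, pvRep_eq_replicate]
    · rw [if_pos rfl, if_pos rfl]
      by_cases hdpos : d > 0
      · rw [if_pos hdpos, if_pos hdpos, h2, alt_map_eq_replicate, pvRep_eq_replicate]
      · rw [if_neg hdpos, if_neg hdpos, h2, alt_map_eq_replicate, pvRep_eq_replicate]
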